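-- pv_equiv track=rewrite | github.com/sjk623095-prog/CY300-coding-project | 10_practice_wpr1_solution.py | string_accumulator
-- ===== SOURCE A (Python) =====
-- def string_accumulator(s):
--     """
--     >>> string_accumulator("12ab34cd11115e9")
--     '11115'
--     >>> string_accumulator("a9b99c")
--     '99'
--     >>> string_accumulator("abc")
--     ''
--     """
--     best_sum = -1
--     best_run = ""
--
--     cur_sum = 0
--     cur_run = ""
--
--     for ch in s:
--         if ch.isdigit():
--             cur_sum += int(ch)
--             cur_run += ch
--         else:
--             if cur_run != "":
--                 if cur_sum > best_sum:
--                     best_sum = cur_sum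
--                     best_run = cur_run
--             cur_sum = 0
--             cur_run = ""
--
--     # commit tail run
--     if cur_run != "":
--         if cur_sum > best_sum:
--             best_sum = cur_sum
--             best_run = cur_run
--
--     if best_sum < 0:
--         return ""
--     return best_run
-- ===== SOURCE B (Python) =====
-- def string_accumulator(s):
--     best_score = -1
--     best_run = ""
--     i = 0
--     n = len(s)
--     while i < n:
--         if s[i].isdigit():
--             j = i
--             while j < n and s[j].isdigit():
--                 j += 1
--             run = s[i:j]
--             score = sum(int(c) for c in run)
--             if score > best_score:
--                 best_score = score
--                 best_run = run
--             i = j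
--         else:
--             i += 1
--     return best_run
-- ===== Notes on version B (the rewrite author's own statement) =====
-- stated objective: alternative
-- what changed: A accumulates the current run char-by-char with commit-on-boundary logic duplicated at the tail; B scans by run boundaries with an index, slices each maximal digit run out whole, scores it, and keeps the best with a strict comparison (first run wins on ties), needing no tail commit.
import Mathlib
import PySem

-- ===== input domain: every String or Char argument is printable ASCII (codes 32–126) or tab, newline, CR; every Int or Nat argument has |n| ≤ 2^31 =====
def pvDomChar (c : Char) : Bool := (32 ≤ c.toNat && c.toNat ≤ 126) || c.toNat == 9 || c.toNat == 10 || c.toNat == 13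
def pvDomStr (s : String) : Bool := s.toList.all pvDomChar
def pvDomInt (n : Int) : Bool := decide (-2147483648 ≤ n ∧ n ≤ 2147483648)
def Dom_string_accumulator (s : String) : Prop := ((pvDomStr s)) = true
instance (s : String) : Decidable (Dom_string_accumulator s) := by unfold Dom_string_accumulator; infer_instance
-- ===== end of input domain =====

-- B replaces A's char-by-char accumulator (with its duplicated tail commit) by a run-boundary scan
-- that slices out each maximal digit run whole and keeps the best by strict comparison; same cost.


-- int(c) for a single char; guarded by isdigit in both programs, where it is always `some`
def pvInt1 (c : Char) : Int := (PySem.Int.ofChars? [c]).getD 0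

-- ===== PORT A =====
def pvAStep (st : Int × List Char × Int × List Char) (ch : Char) :
    Int × List Char × Int × List Char :=
  let (bs, br, cs, cr) := st
  if PySem.Chars.isdigit ch then
    (bs, br, cs + pvInt1 ch, cr ++ [ch])
  else
    if cr ≠ [] then
      if cs > bs then (cs, cr, 0, []) else (bs, br, 0, [])
    else (bs, br, 0, [])

def string_accumulator (s : String) : String :=
  let st := s.toList.foldl pvAStep (-1, [], 0, [])
  let (bs, br, cs, cr) := st
  -- commit tail run
  let p : Int × List Char :=
    if cr ≠ [] then (if cs > bs then (cs, cr) else (bs, br)) else (bs, br)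
  if p.1 < 0 then "" else String.ofList p.2

-- ===== PORT B =====
-- sum(int(c) for c in run)
def pvScore (run : List Char) : Int := (run.map pvInt1).sum

-- Source B's outer while: on a digit, the inner `while j < n and s[j].isdigit()` plus the slice s[i:j]
-- are exactly takeWhile/dropWhile of the remaining characters.
def pvBGo (bs : Int) (br : List Char) : List Char → List Char
  | [] => br
  | c :: cs =>
    if PySem.Chars.isdigit c then
      let run := (c :: cs).takeWhile PySem.Chars.isdigit
      let rest := (c :: cs).dropWhile PySem.Chars.isdigit
      if pvScore run > bs then pvBGo (pvScore run) run rest else pvBGo bs br rest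
    else pvBGo bs br cs
termination_by l => l.length
decreasing_by
  · simp only [List.dropWhile_cons, *, if_pos]
    have := List.length_dropWhile_le PySem.Chars.isdigit cs
    simp only [List.length_cons]; omega
  · simp only [List.dropWhile_cons, *, if_pos]
    have := List.length_dropWhile_le PySem.Chars.isdigit cs
    simp only [List.length_cons]; omega
  · simp [List.length_cons]

def string_accumulator_alt (s : String) : String := String.ofList (pvBGo (-1) [] s.toList)

-- ===== PRECONDITION & SPEC =====
def Spec_string_accumulator (s : String) (out : String) : Prop := out = string_accumulator_alt s
instance (s : String) (out : String) : Decidable (Spec_string_accumulator s out) := by unfold Spec_string_accumulator; infer_instance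

-- ===== CLAIM (what is proved, stated in full; the proofs are below) =====
def Claim_equal_string_accumulator : Prop := ∀ (s : String), Dom_string_accumulator s → Spec_string_accumulator s (string_accumulator s)

-- ===== LEMMAS AND PROOFS =====

-- A's tail-commit + final check, at list level (proof helper)
def pvFinishList (st : Int × List Char × Int × List Char) : List Char :=
  let (bs, br, cs, cr) := st
  let p : Int × List Char :=
    if cr ≠ [] then (if cs > bs then (cs, cr) else (bs, br)) else (bs, br)
  if p.1 < 0 then [] else p.2

lemma pvInt1_nonneg (c : Char) (h : PySem.Chars.isdigit c = true) : 0 ≤ pvInt1 c := by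
  have h' : '0' ≤ c ∧ c ≤ '9' := by simpa [PySem.Chars.isdigit] using h
  have hlo : 48 ≤ c.toNat := h'.1
  have hhi : c.toNat ≤ 57 := h'.2
  interval_cases hc : c.toNat
  all_goals (rw [← Char.ofNat_toNat c, hc]; decide)

lemma pvScore_nonneg (run : List Char) (h : ∀ c ∈ run, PySem.Chars.isdigit c = true) :
    0 ≤ pvScore run := by
  induction run with
  | nil => simp [pvScore]
  | cons c t ih =>
    have h1 := pvInt1_nonneg c (h c (by simp))
    have h2 := ih (fun x hx => h x (by simp [hx]))
    simp only [pvScore, List.map_cons, List.sum_cons] at *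
    omega

-- consuming a block of digits accumulates its score and text
lemma pvConsume (run : List Char) (h : ∀ c ∈ run, PySem.Chars.isdigit c = true) :
    ∀ (rest : List Char) (bs : Int) (br : List Char) (cs : Int) (cr : List Char),
      List.foldl pvAStep (bs, br, cs, cr) (run ++ rest) =
      List.foldl pvAStep (bs, br, cs + pvScore run, cr ++ run) rest := by
  induction run with
  | nil => intro rest bs br cs cr; simp [pvScore]
  | cons c t ih =>
    intro rest bs br cs cr
    have hc : PySem.Chars.isdigit c = true := h c (by simp)
    have ht : ∀ x ∈ t, PySem.Chars.isdigit x = true := fun x hx => h x (by simp [hx])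
    simp only [List.cons_append, List.foldl_cons, pvAStep, hc, if_pos]
    rw [ih ht]
    simp only [pvScore, List.map_cons, List.sum_cons]
    ring_nf
    simp [List.append_assoc]

lemma pvMain : ∀ (n : Nat) (l : List Char), l.length ≤ n →
    ∀ (bs : Int) (br : List Char), (bs < 0 → br = []) →
      pvFinishList (List.foldl pvAStep (bs, br, 0, []) l) = pvBGo bs br l := by
  intro n
  induction n with
  | zero =>
    intro l hl bs br hinv
    have : l = [] := List.eq_nil_of_length_eq_zero (by omega)
    subst this
    simp only [List.foldl_nil, pvFinishList, pvBGo]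
    by_cases hb : bs < 0
    · simp [hb, hinv hb]
    · simp [hb]
  | succ m ih =>
    intro l hl bs br hinv
    match l with
    | [] =>
      simp only [List.foldl_nil, pvFinishList, pvBGo]
      by_cases hb : bs < 0
      · simp [hb, hinv hb]
      · simp [hb]
    | c :: cs =>
      by_cases hc : PySem.Chars.isdigit c = true
      · -- a maximal digit run starts here
        set run := (c :: cs).takeWhile PySem.Chars.isdigit with hrun
        set rest := (c :: cs).dropWhile PySem.Chars.isdigit with hrest
        have hsplit : run ++ rest = c :: cs := List.takeWhile_append_dropWhile
        have hdig : ∀ x ∈ run, PySem.Chars.isdigit x = true := by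
          intro x hx; exact List.mem_takeWhile_imp hx
        have hrunc : run = c :: cs.takeWhile PySem.Chars.isdigit := by
          simp [hrun, hc]
        have hlen : run.length + rest.length = cs.length + 1 := by
          have := congrArg List.length hsplit; simpa using this
        have hrunpos : 0 < run.length := by simp [hrunc]
        have hfold : List.foldl pvAStep (bs, br, 0, []) (c :: cs) =
            List.foldl pvAStep (bs, br, pvScore run, run) rest := by
          rw [← hsplit, pvConsume run hdig]; simp
        have hscore := pvScore_nonneg run hdig
        have hBgo : pvBGo bs br (c :: cs) =
            if pvScore run > bs then pvBGo (pvScore run) run rest else pvBGo bs br rest := by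
          rw [pvBGo]; simp [hc, ← hrun, ← hrest]
        rw [hfold, hBgo]
        match hre : rest with
        | [] =>
          have hrn : run ≠ [] := by simp [hrunc]
          simp only [List.foldl_nil, pvFinishList, hrn, if_pos, ne_eq, not_false_iff]
          by_cases hgt : pvScore run > bs
          · simp only [hgt, if_pos, pvBGo]
            have : ¬ pvScore run < 0 := by omega
            simp [this]
          · simp only [hgt, pvBGo, ite_false]
            by_cases hb : bs < 0
            · simp [hb, hinv hb]
            · simp [hb]
        | r :: rs =>
          have hdrop : (c :: cs).dropWhile PySem.Chars.isdigit = r :: rs := hrest.symm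
          have hr : PySem.Chars.isdigit r = false := by
            have := List.head_dropWhile_not PySem.Chars.isdigit (l := c :: cs) (by simp [hdrop])
            simpa [hdrop] using this
          have hrs : rs.length ≤ m := by
            simp only [List.length_cons] at hlen hl
            omega
          have hstep : ∀ X Y, pvAStep (X, Y, pvScore run, run) r =
              (if pvScore run > X then (pvScore run, run, 0, ([] : List Char)) else (X, Y, 0, [])) := by
            intro X Y
            have hrn : run ≠ [] := by simp [hrunc]
            simp [pvAStep, hr, hrn]
          simp only [List.foldl_cons, hstep]
          by_cases hgt : pvScore run > bs
          · simp only [hgt, if_pos]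
            rw [ih rs hrs (pvScore run) run (fun hlt => absurd hlt (by omega))]
            rw [pvBGo]; simp [hr]
          · simp only [hgt, ite_false]
            rw [ih rs hrs bs br hinv]
            rw [pvBGo]; simp [hr]
      · -- non-digit with empty current run: plain skip
        have hstep : pvAStep (bs, br, 0, ([] : List Char)) c = (bs, br, 0, []) := by
          simp [pvAStep, hc]
        have hcs : cs.length ≤ m := by simp only [List.length_cons] at hl; omega
        simp only [List.foldl_cons, hstep]
        rw [ih cs hcs bs br hinv, pvBGo]
        simp [hc]

-- ===== VERDICT (by name: the statement is the Claim_ definition above) =====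
theorem string_accumulator_spec : Claim_equal_string_accumulator := by
  intro s _
  unfold Spec_string_accumulator string_accumulator string_accumulator_alt
  have h := pvMain s.toList.length s.toList le_rfl (-1) [] (fun _ => rfl)
  generalize List.foldl pvAStep (-1, [], 0, []) s.toList = st at h ⊢
  rcases st with ⟨bs, br, cs, cr⟩
  simp only [pvFinishList] at h
  rw [← h]
  dsimp only
  split_ifs <;> rfl
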